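-- pv_equiv track=rewrite | github.com/Jackfantas/git_test | 1_公司笔试/微软笔试827/2.py | solution
-- ===== SOURCE A (Python) =====
-- def solution(A, N, M):
--     res = [0]
--     track = []
--     A.sort()
--     def back_track(start, M):
--
--         if start <= N:
--             res[0] = max(res[0], len(track))
--             if start == N: return
--
--         for i in range(start, N):
--             if track:
--                 if (A[i]-track[0])%M==0:
--                     track.append(A[i])
--                     back_track(i+1, M)
--                     track.pop(-1)
--                 else:
--                     continue
--             else:
--                 track.append(A[i])
--                 back_track(i + 1, M)
--                 track.pop(-1)
--     back_track(0, M)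
--     return res[0]
-- ===== SOURCE B (Python) =====
-- def solution(A, N, M):
--     # Max size of a subset of A[:N] (after sorting, as A does in place) whose
--     # elements are pairwise congruent mod M = the largest residue class mod M.
--     A.sort()
--     counts = {}
--     for i in range(N):
--         r = A[i] % M
--         counts[r] = counts.get(r, 0) + 1
--     best = 0
--     for c in counts.values():
--         if c > best:
--             best = c
--     return best
-- ===== Notes on version B (the rewrite author's own statement) =====
-- stated objective: alternative
-- what changed: Replaces the exhaustive backtracking over all congruent subsets by a single counting pass: bucket the first N elements of the sorted list by residue mod M and return the largest bucket.
-- outside the precondition, e.g. on solution([5], 1, 0): A returns 1, B raises ZeroDivisionError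
import Mathlib
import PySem

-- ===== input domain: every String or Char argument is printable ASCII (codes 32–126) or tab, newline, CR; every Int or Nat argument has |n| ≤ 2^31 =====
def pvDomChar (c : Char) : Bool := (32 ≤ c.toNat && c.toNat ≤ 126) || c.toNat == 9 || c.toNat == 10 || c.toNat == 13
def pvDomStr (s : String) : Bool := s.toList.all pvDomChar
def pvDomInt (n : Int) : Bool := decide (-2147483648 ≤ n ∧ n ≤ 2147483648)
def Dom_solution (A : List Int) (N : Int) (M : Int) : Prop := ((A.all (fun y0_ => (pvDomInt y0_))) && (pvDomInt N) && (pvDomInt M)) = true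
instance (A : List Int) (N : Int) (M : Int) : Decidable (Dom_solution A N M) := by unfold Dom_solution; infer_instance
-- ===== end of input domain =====

-- B computes the same value by one counting pass: bucket the first N sorted elements by residue
-- mod M and take the largest bucket (objective: alternative algorithm). Both A and B sort the
-- argument list in place; the theorems are about the return value.

-- ===== PORT A =====
-- fuel = N.toNat + 1 strictly exceeds the recursion depth (each recursive call increases `start`
-- by at least 1 and `start` never exceeds N), so the fuel-0 branch is never reached.
-- A[i]: Python would raise IndexError out of range; Pre_ keeps indices in range, default 0 unused.
def pvBack (S : List Int) (N M : Int) : Nat → Int → List Int → Int → Int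
  | 0, _, _, res => res
  | fuel+1, start, track, res =>
    let body := fun (r : Int) (i : Int) =>
      match track with
      | [] => pvBack S N M fuel (i+1) (track ++ [PySem.List.pyGetD S i 0]) r
      | h :: _ =>
        if PySem.Int.mod (PySem.List.pyGetD S i 0 - h) M = 0 then
          pvBack S N M fuel (i+1) (track ++ [PySem.List.pyGetD S i 0]) r
        else r
    if start ≤ N then
      let res1 := max res (track.length : Int)
      if start = N then res1
      else (PySem.List.pyRange start N 1).foldl body res1
    else (PySem.List.pyRange start N 1).foldl body res

def solution (A : List Int) (N : Int) (M : Int) : Int :=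
  let S := PySem.List.sorted A (fun x => x) false   -- A.sort()
  pvBack S N M (N.toNat + 1) 0 [] 0

-- ===== PORT B =====
def solution_alt (A : List Int) (N : Int) (M : Int) : Int :=
  let S := PySem.List.sorted A (fun x => x) false   -- A.sort()
  let counts := (PySem.List.pyRange 0 N 1).foldl
    (fun d i => d.insert (PySem.Int.mod (PySem.List.pyGetD S i 0) M)
                         (d.getD (PySem.Int.mod (PySem.List.pyGetD S i 0) M) 0 + 1))
    (PySem.Dict.empty : PySem.Dict Int Int)
  counts.values.foldl (fun best c => if best < c then c else best) 0

-- ===== PRECONDITION & SPEC =====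
-- Pre_ excludes N > len(A) (A raises IndexError there) and M = 0 with N ≥ 1 (A raises
-- ZeroDivisionError whenever it must compare two picked elements, and B's counting pass raises
-- ZeroDivisionError already on the first element, so B cannot match A's value even in the one
-- degenerate returning corner N = 1).
def Pre_solution (A : List Int) (N : Int) (M : Int) : Prop := (M ≠ 0 ∨ N ≤ 0) ∧ N ≤ A.length
instance (A : List Int) (N : Int) (M : Int) : Decidable (Pre_solution A N M) := by unfold Pre_solution; infer_instance
def pvWitness_solution : List Int × Int × Int := ([2, 5, 9], 3, 3)

def Spec_solution (A : List Int) (N : Int) (M : Int) (out : Int) : Prop := out = solution_alt A N M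
instance (A : List Int) (N : Int) (M : Int) (out : Int) : Decidable (Spec_solution A N M out) := by unfold Spec_solution; infer_instance

-- ===== CLAIM (what is proved, stated in full; the proofs are below) =====
def Claim_equal_solution : Prop := ∀ (A : List Int) (N : Int) (M : Int), Dom_solution A N M → Pre_solution A N M → Spec_solution A N M (solution A N M)

-- ===== LEMMAS AND PROOFS =====

-- residue of the i-th element
def pvKey (S : List Int) (M : Int) (i : Int) : Int := PySem.Int.mod (PySem.List.pyGetD S i 0) M

-- number of indices in [a, N) whose element is congruent to h mod M
def pvCnt (S : List Int) (N M h a : Int) : Int :=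
  (((PySem.List.pyRange a N 1).countP
      (fun j => decide (PySem.Int.mod (PySem.List.pyGetD S j 0 - h) M = 0)) : Nat) : Int)

-- running best of 1 + (number of later equal elements), over a list of residues
def pvG : List Int → Int
  | [] => 0
  | y :: t => max (1 + (t.count y : Int)) (pvG t)

theorem pv_if_max (a b : Int) : (if a < b then b else a) = max a b := by omega

theorem pv_modsub_iff (x h M : Int) (hM : M ≠ 0) :
    (PySem.Int.mod (x - h) M = 0) ↔ PySem.Int.mod x M = PySem.Int.mod h M := by
  rw [PySem.Int.mod_eq_zero_iff_dvd]
  have e1 := PySem.Int.floordiv_mul_add_mod x M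
  have e2 := PySem.Int.floordiv_mul_add_mod h M
  constructor
  · intro hdvd
    obtain ⟨c, hc⟩ := hdvd
    have hd2 : M ∣ (PySem.Int.mod x M - PySem.Int.mod h M) :=
      ⟨c - (PySem.Int.floordiv x M - PySem.Int.floordiv h M), by linear_combination e1 - e2 + hc⟩
    have habs : |PySem.Int.mod x M - PySem.Int.mod h M| < |M| := by
      rcases lt_or_gt_of_ne hM with hneg | hpos
      · have b1 := PySem.Int.mod_neg_bounds x hneg
        have b2 := PySem.Int.mod_neg_bounds h hneg
        rw [abs_of_neg hneg, abs_lt]; omega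
      · have b1 := PySem.Int.mod_nonneg x hpos
        have b1' := PySem.Int.mod_lt x hpos
        have b2 := PySem.Int.mod_nonneg h hpos
        have b2' := PySem.Int.mod_lt h hpos
        rw [abs_of_pos hpos, abs_lt]; omega
    have := Int.eq_zero_of_abs_lt_dvd ((abs_dvd _ _).mpr hd2) habs
    omega
  · intro heq
    exact ⟨PySem.Int.floordiv x M - PySem.Int.floordiv h M, by linear_combination e2 - e1 + heq⟩

theorem pv_cnt_nonneg (S : List Int) (N M h a : Int) : 0 ≤ pvCnt S N M h a := by
  unfold pvCnt; positivity

theorem pv_cnt_nil (S : List Int) (N M h a : Int) (ha : N ≤ a) : pvCnt S N M h a = 0 := by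
  unfold pvCnt; rw [PySem.List.pyRange_one_eq_nil ha]; simp

theorem pv_cnt_cons (S : List Int) (N M h a : Int) (ha : a < N) :
    pvCnt S N M h a
      = (if PySem.Int.mod (PySem.List.pyGetD S a 0 - h) M = 0 then 1 else 0) + pvCnt S N M h (a+1) := by
  unfold pvCnt
  rw [PySem.List.pyRange_one_cons ha, List.countP_cons]
  simp only [decide_eq_true_eq]
  split_ifs with hc <;> push_cast <;> omega

-- the inner for-loop of back_track for a nonempty track (head h, length L)
theorem pv_loopH (S : List Int) (N M h L : Int) (body : Int → Int → Int) :
    ∀ (k : Nat) (a r : Int), (N - a).toNat ≤ k → L ≤ r →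
      (∀ r' i, a ≤ i → i < N → body r' i
        = if PySem.Int.mod (PySem.List.pyGetD S i 0 - h) M = 0
          then max r' (L + 1 + pvCnt S N M h (i+1)) else r') →
      (PySem.List.pyRange a N 1).foldl body r = max r (L + pvCnt S N M h a) := by
  intro k
  induction k with
  | zero =>
    intro a r hk hr _
    have ha : N ≤ a := by omega
    rw [PySem.List.pyRange_one_eq_nil ha, pv_cnt_nil S N M h a ha]
    simp only [List.foldl_nil]; omega
  | succ k ih =>
    intro a r hk hr hbody
    rcases le_or_gt N a with ha | ha
    · rw [PySem.List.pyRange_one_eq_nil ha, pv_cnt_nil S N M h a ha]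
      simp only [List.foldl_nil]; omega
    · rw [PySem.List.pyRange_one_cons ha, List.foldl_cons,
        hbody r a (le_refl a) ha, pv_cnt_cons S N M h a ha]
      have hcnt := pv_cnt_nonneg S N M h (a+1)
      split_ifs with hc
      · rw [ih (a+1) _ (by omega) (by omega)
          (fun r' i h1 h2 => hbody r' i (by omega) h2)]
        omega
      · rw [ih (a+1) _ (by omega) hr
          (fun r' i h1 h2 => hbody r' i (by omega) h2)]
        omega

-- back_track with a nonempty track = max of res and track length + later congruent count
theorem pv_back_nonempty (S : List Int) (N M h : Int) :
    ∀ (fuel : Nat) (t : List Int) (start r : Int),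
      (N - start).toNat < fuel → start ≤ N →
      pvBack S N M fuel start (h :: t) r
        = max r ((1 + (t.length : Int)) + pvCnt S N M h start) := by
  intro fuel
  induction fuel with
  | zero => intro t start r hk _; omega
  | succ fuel ih =>
    intro t start r hk hstart
    rw [pvBack]
    simp only [hstart, if_true]
    by_cases he : start = N
    · rw [if_pos he, pv_cnt_nil S N M h start (ge_of_eq he), List.length_cons]
      push_cast; omega
    · rw [if_neg he]
      rw [pv_loopH S N M h (1 + (t.length : Int)) _ fuel start _ (by omega)
          (by simp only [List.length_cons]; push_cast; omega)
          (fun r' i h1 h2 => by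
            rw [show (h :: t) ++ [PySem.List.pyGetD S i 0] = h :: (t ++ [PySem.List.pyGetD S i 0]) from rfl]
            split_ifs with hc
            · rw [ih (t ++ [PySem.List.pyGetD S i 0]) (i+1) r' (by omega) (by omega)]
              simp only [List.length_append, List.length_cons, List.length_nil]
              push_cast; ring_nf
            · rfl)]
      simp only [List.length_cons]
      have := pv_cnt_nonneg S N M h start
      push_cast; omega

theorem pv_cnt_eq_count (S : List Int) (N M a b : Int) (hM : M ≠ 0) :
    pvCnt S N M (PySem.List.pyGetD S a 0) b
      = (((PySem.List.pyRange b N 1).map (pvKey S M)).count (pvKey S M a) : Int) := by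
  unfold pvCnt
  rw [List.count, List.countP_map]
  congr 1
  refine List.countP_congr ?_
  intro j hj
  simp only [Function.comp_apply, pvKey, decide_eq_true_eq, beq_iff_eq]
  exact ((pv_modsub_iff (PySem.List.pyGetD S j 0) (PySem.List.pyGetD S a 0) M hM))

theorem pvG_cons (y : Int) (t : List Int) : pvG (y :: t) = max (1 + (t.count y : Int)) (pvG t) := rfl

theorem pvG_nonneg (zs : List Int) : 0 ≤ pvG zs := by
  induction zs with
  | nil => simp [pvG]
  | cons y t ih => rw [pvG_cons]; omega

theorem pvG_le_split : ∀ (pre : List Int) (y : Int) (t : List Int),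
    1 + (t.count y : Int) ≤ pvG (pre ++ y :: t) := by
  intro pre
  induction pre with
  | nil => intro y t; rw [List.nil_append, pvG_cons]; omega
  | cons p pre ih => intro y t; rw [List.cons_append, pvG_cons]; have := ih y t; omega

theorem pvG_cases (zs : List Int) :
    pvG zs = 0 ∨ ∃ pre y t, zs = pre ++ y :: t ∧ pvG zs = 1 + (t.count y : Int) := by
  induction zs with
  | nil => left; rfl
  | cons z t ih =>
    rw [pvG_cons]
    by_cases hc : pvG t ≤ 1 + (t.count z : Int)
    · right; exact ⟨[], z, t, rfl, by omega⟩
    · rcases ih with h0 | ⟨pre, y, t', hs, hv⟩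
      · omega
      · right
        exact ⟨z :: pre, y, t', by rw [List.cons_append, ← hs], by omega⟩

theorem pv_first_split (y : Int) : ∀ zs : List Int, y ∈ zs → ∃ pre t, zs = pre ++ y :: t ∧ y ∉ pre := by
  intro zs
  induction zs with
  | nil => intro h; cases h
  | cons z t ih =>
    intro h
    by_cases hz : z = y
    · exact ⟨[], t, by rw [hz, List.nil_append], by simp⟩
    · have hyt : y ∈ t := by
        rcases List.mem_cons.mp h with h1 | h1
        · exact absurd h1.symm hz
        · exact h1
      obtain ⟨pre, t', hs, hn⟩ := ih hyt
      refine ⟨z :: pre, t', by rw [List.cons_append, ← hs], ?_⟩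
      intro hmem
      rcases List.mem_cons.mp hmem with h1 | h1
      · exact hz h1.symm
      · exact hn h1

theorem pv_G_eq_setmax (zs : List Int) :
    pvG zs = ((PySem.Set.ofList zs).map (fun k => (zs.count k : Int))).foldl max 0 := by
  apply le_antisymm
  · rcases pvG_cases zs with h0 | ⟨pre, y, t, hs, hv⟩
    · rw [h0]; exact (PySem.List.le_foldl_max _ _).1
    · have hy : y ∈ zs := by rw [hs]; exact List.mem_append_right _ (List.mem_cons_self)
      have hy' : y ∈ PySem.Set.ofList zs := (PySem.Set.mem_ofList zs y).mpr hy
      have hmem : (zs.count y : Int) ∈ (PySem.Set.ofList zs).map (fun k => (zs.count k : Int)) :=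
        List.mem_map_of_mem hy'
      have hle := (PySem.List.le_foldl_max ((PySem.Set.ofList zs).map (fun k => (zs.count k : Int))) 0).2 _ hmem
      have hcnt : 1 + t.count y ≤ zs.count y := by
        rw [hs, List.count_append, List.count_cons_self]; omega
      omega
  · rcases PySem.List.foldl_max_mem ((PySem.Set.ofList zs).map (fun k => (zs.count k : Int))) 0 with h0 | hm
    · rw [h0]; exact pvG_nonneg zs
    · obtain ⟨y, hy, hfy⟩ := List.mem_map.mp hm
      have hyzs : y ∈ zs := (PySem.Set.mem_ofList zs y).mp hy
      obtain ⟨pre, t, hs, hn⟩ := pv_first_split y zs hyzs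
      have hc : zs.count y = 1 + t.count y := by
        rw [hs, List.count_append, List.count_cons_self, List.count_eq_zero.mpr hn]; omega
      have hle := pvG_le_split pre y t
      rw [← hs] at hle
      rw [← hfy]
      omega

-- the top-level for-loop of back_track (empty track)
theorem pv_loop0 (S : List Int) (N M : Int) (hM : M ≠ 0) :
    ∀ (k : Nat) (a r : Int), (N - a).toNat ≤ k → 0 ≤ a → 0 ≤ r →
      (PySem.List.pyRange a N 1).foldl
          (fun r i => pvBack S N M N.toNat (i+1) [PySem.List.pyGetD S i 0] r) r
        = max r (pvG ((PySem.List.pyRange a N 1).map (pvKey S M))) := by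
  intro k
  induction k with
  | zero =>
    intro a r hk ha hr
    rw [PySem.List.pyRange_one_eq_nil (by omega)]
    simp only [List.foldl_nil, List.map_nil, pvG]
    omega
  | succ k ih =>
    intro a r hk ha hr
    rcases le_or_gt N a with hN | hN
    · rw [PySem.List.pyRange_one_eq_nil hN]
      simp only [List.foldl_nil, List.map_nil, pvG]
      omega
    · rw [PySem.List.pyRange_one_cons hN, List.foldl_cons, List.map_cons, pvG_cons]
      rw [pv_back_nonempty S N M (PySem.List.pyGetD S a 0) N.toNat [] (a+1) r (by omega) (by omega)]
      simp only [List.length_nil, Nat.cast_zero, add_zero]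
      rw [ih (a+1) _ (by omega) (by omega)
          (by have := pv_cnt_nonneg S N M (PySem.List.pyGetD S a 0) (a+1); omega)]
      rw [pv_cnt_eq_count S N M a (a+1) hM]
      have := pvG_nonneg ((PySem.List.pyRange (a+1) N 1).map (pvKey S M))
      omega

theorem pv_A_eq (A : List Int) (N M : Int) (hM : M ≠ 0 ∨ N ≤ 0) :
    solution A N M
      = pvG ((PySem.List.pyRange 0 N 1).map (pvKey (PySem.List.sorted A (fun x => x) false) M)) := by
  show pvBack (PySem.List.sorted A (fun x => x) false) N M (N.toNat + 1) 0 [] 0 = _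
  set S := PySem.List.sorted A (fun x => x) false with hS
  rcases lt_trichotomy N 0 with h | h | h
  · rw [pvBack, if_neg (by omega), PySem.List.pyRange_one_eq_nil (by omega)]
    simp [pvG]
  · rw [pvBack, if_pos (by omega), if_pos h.symm, PySem.List.pyRange_one_eq_nil (by omega)]
    simp [pvG]
  · have hM' : M ≠ 0 := by rcases hM with h' | h'; exact h'; omega
    rw [pvBack, if_pos (by omega : (0:Int) ≤ N), if_neg (by omega : ¬(0:Int) = N)]
    have hmain := pv_loop0 S N M hM' (N - 0).toNat 0 (max 0 ((List.length ([] : List Int) : Nat) : Int))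
      (by omega) (by omega) (by simp)
    refine Eq.trans hmain ?_
    have := pvG_nonneg ((PySem.List.pyRange 0 N 1).map (pvKey S M))
    simp only [List.length_nil, Nat.cast_zero]
    omega

theorem pv_fold_insert (S : List Int) (M : Int) :
    ∀ (l : List Int) (d : PySem.Dict Int Int),
      l.foldl (fun d i => d.insert (PySem.Int.mod (PySem.List.pyGetD S i 0) M)
                                   (d.getD (PySem.Int.mod (PySem.List.pyGetD S i 0) M) 0 + 1)) d
        = (l.map (pvKey S M)).foldl (fun d x => d.insert x (d.getD x 0 + 1)) d := by
  intro l
  induction l with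
  | nil => intro d; rfl
  | cons x t ih => intro d; rw [List.foldl_cons, List.map_cons, List.foldl_cons, ih]; rfl

theorem pv_B_eq (A : List Int) (N M : Int) :
    solution_alt A N M
      = ((PySem.Set.ofList ((PySem.List.pyRange 0 N 1).map (pvKey (PySem.List.sorted A (fun x => x) false) M))).map
          (fun k => (((PySem.List.pyRange 0 N 1).map (pvKey (PySem.List.sorted A (fun x => x) false) M)).count k : Int))).foldl max 0 := by
  set S := PySem.List.sorted A (fun x => x) false with hS
  set zs := (PySem.List.pyRange 0 N 1).map (pvKey S M) with hzs
  show (((PySem.List.pyRange 0 N 1).foldl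
      (fun d i => d.insert (PySem.Int.mod (PySem.List.pyGetD S i 0) M)
                           (d.getD (PySem.Int.mod (PySem.List.pyGetD S i 0) M) 0 + 1))
      (PySem.Dict.empty : PySem.Dict Int Int)).values).foldl
      (fun best c => if best < c then c else best) 0 = _
  rw [pv_fold_insert S M, ← hzs, PySem.Dict.foldl_insert_getD_add_one_eq_counter]
  have hv : (PySem.Dict.counter zs).values = (PySem.Set.ofList zs).map (fun k => (zs.count k : Int)) := by
    show (PySem.Dict.counter zs).items.map (·.2) = _
    rw [PySem.Dict.items_counter, List.map_map]
    rfl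
  rw [hv]
  simp only [pv_if_max]

-- ===== VERDICT (by name: the statement is the Claim_ definition above) =====
theorem solution_spec : Claim_equal_solution := by
  intro A N M _ hpre
  unfold Spec_solution
  rw [pv_A_eq A N M hpre.1, pv_B_eq A N M, ← pv_G_eq_setmax]
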